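-- pv_equiv track=rewrite | github.com/whyj107/TIL | 2022/20220218_Simple Fun #354 Lonely Frog III.py | jump_to
-- ===== SOURCE A (Python) =====
-- def jump_to(x, y):
--     cnt = 0
--     while x != y:
--         if y//2 == y/2 and y//2 >= x:
--             y //= 2
--         else:
--             y -= 1
--         cnt += 1
--     return cnt
-- ===== SOURCE B (Python) =====
-- def jump_to(x, y):
--     # halve (decrementing first when odd) while halving stays >= x; then finish with y-x decrements
--     cnt = 0
--     while y >= 2 * x and y != x:
--         if y % 2:
--             y -= 1
--         else:
--             y //= 2
--         cnt += 1
--     return cnt + (y - x)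
-- ===== Notes on version B (the rewrite author's own statement) =====
-- stated objective: alternative
-- what changed: B keeps the halving phase but replaces A's one-by-one decrement walk through the final interval [x, 2x) with the closed form y - x.
-- outside the precondition, e.g. on jump_to(-2, -1): A returns 1, B returns 1; on jump_to(-3, -3): A returns 0, B returns 0
import Mathlib
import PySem

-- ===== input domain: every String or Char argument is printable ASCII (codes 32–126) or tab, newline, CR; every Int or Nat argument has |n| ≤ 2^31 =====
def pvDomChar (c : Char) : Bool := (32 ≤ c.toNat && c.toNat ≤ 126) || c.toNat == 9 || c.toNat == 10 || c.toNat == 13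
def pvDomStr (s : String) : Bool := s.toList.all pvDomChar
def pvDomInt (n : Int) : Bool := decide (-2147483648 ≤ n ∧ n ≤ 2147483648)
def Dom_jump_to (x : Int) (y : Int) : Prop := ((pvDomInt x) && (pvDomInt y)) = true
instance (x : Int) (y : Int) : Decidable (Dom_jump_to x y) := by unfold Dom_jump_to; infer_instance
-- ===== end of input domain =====

-- B keeps A's halving phase but replaces A's one-by-one decrement walk through [x, 2x)
-- with the closed form y - x (a different algorithm for the final phase).

-- ===== PORT A =====
-- A's while loop, step for step, totalized with fuel (fuel 0 = the Python loop has not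
-- terminated; inside Pre_ the loop takes at most y - x steps, so the fuel is never exhausted).
-- A's evenness test `y//2 == y/2` is exact evenness for |y| ≤ 2^31 (floats are exact below
-- 2^53), ported as `PySem.Int.mod y 2 = 0`.
def jumpLoopA (fuel : Nat) (x y cnt : Int) : Int :=
  match fuel with
  | 0 => cnt
  | f + 1 =>
    if y = x then cnt
    else if PySem.Int.mod y 2 = 0 ∧ x ≤ PySem.Int.floordiv y 2 then
      jumpLoopA f x (PySem.Int.floordiv y 2) (cnt + 1)
    else
      jumpLoopA f x (y - 1) (cnt + 1)

def jump_to (x : Int) (y : Int) : Int := jumpLoopA ((y - x).toNat + 70) x y 0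

-- ===== PORT B =====
-- B's while loop (halve while y ≥ 2x, decrementing first when odd), then the closed form + (y - x).
-- The `x < 0` guard only totalizes the recursion: there the Python loop may diverge (outside Pre_).
def jumpLoopB (x y cnt : Int) : Int :=
  if _h1 : 2 * x ≤ y ∧ y ≠ x then
    if _h2 : x < 0 then cnt + (y - x)  -- unreachable under Pre_
    else if PySem.Int.mod y 2 ≠ 0 then
      jumpLoopB x (y - 1) (cnt + 1)
    else
      jumpLoopB x (PySem.Int.floordiv y 2) (cnt + 1)
  else cnt + (y - x)
termination_by y.toNat
decreasing_by
  · omega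
  · have := PySem.Int.floordiv_eq_ediv_of_pos (a := y) (b := 2) (by omega)
    have hm := PySem.Int.mod_eq_emod_of_pos (a := y) (b := 2) (by omega)
    have := Int.emod_two_eq y
    omega

def jump_to_alt (x : Int) (y : Int) : Int := jumpLoopB x y 0

-- ===== PRECONDITION & SPEC =====
-- Pre_ is the problem's natural domain 0 ≤ x ≤ y: A's loop never terminates whenever y < x,
-- and diverges on many inputs with x < 0 (e.g. (-5,-4) or (-1,0)); the few negative inputs on
-- which A does return (e.g. x = y < 0) are excluded with them by the same closed-form bound.
def Pre_jump_to (x : Int) (y : Int) : Prop := 0 ≤ x ∧ x ≤ y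
instance (x : Int) (y : Int) : Decidable (Pre_jump_to x y) := by unfold Pre_jump_to; infer_instance
def pvWitness_jump_to : Int × Int := (3, 100)

def Spec_jump_to (x : Int) (y : Int) (out : Int) : Prop := out = jump_to_alt x y
instance (x : Int) (y : Int) (out : Int) : Decidable (Spec_jump_to x y out) := by unfold Spec_jump_to; infer_instance

-- ===== CLAIM (what is proved, stated in full; the proofs are below) =====
def Claim_equal_jump_to : Prop := ∀ (x : Int) (y : Int), Dom_jump_to x y → Pre_jump_to x y → Spec_jump_to x y (jump_to x y)

-- ===== LEMMAS AND PROOFS =====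

-- Once y has entered [x, 2x) (with 0 ≤ x), B's loop exits immediately with the closed form.
lemma loopB_exit (x y cnt : Int) (h : ¬ (2 * x ≤ y ∧ y ≠ x)) :
    jumpLoopB x y cnt = cnt + (y - x) := by
  rw [jumpLoopB]; simp [h]

-- Main invariant: on 0 ≤ x ≤ y, with fuel exceeding the y - x remaining steps,
-- A's loop agrees with B's loop (same y, same cnt).
lemma loop_eq (f : ℕ) : ∀ (x y cnt : Int), 0 ≤ x → x ≤ y → y - x < f →
    jumpLoopA f x y cnt = jumpLoopB x y cnt := by
  induction f with
  | zero => intro x y cnt _ _ hf; omega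
  | succ f ih =>
    intro x y cnt hx hxy hf
    have hfd := PySem.Int.floordiv_eq_ediv_of_pos (a := y) (b := 2) (by omega)
    have hmd := PySem.Int.mod_eq_emod_of_pos (a := y) (b := 2) (by omega)
    have hm := Int.emod_two_eq y
    by_cases heq : y = x
    · rw [jumpLoopA, jumpLoopB]
      simp [heq]
    · have hlt : x < y := lt_of_le_of_ne hxy (Ne.symm heq)
      rw [jumpLoopA]
      simp only [heq, if_false, hmd, hfd]
      by_cases hhalf : y % 2 = 0 ∧ x ≤ y / 2
      · -- A halves; then 2x ≤ y, so B halves too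
        simp only [hhalf]
        rw [jumpLoopB]
        have h2x : 2 * x ≤ y := by omega
        simp only [show (2 * x ≤ y ∧ y ≠ x) by exact ⟨h2x, heq⟩,
          show ¬ x < 0 by omega, dite_false, hmd, hfd, hhalf.1, ne_eq,
          not_true_eq_false, if_false]
        exact ih x (y / 2) (cnt + 1) hx (by omega) (by omega)
      · simp only [hhalf, if_false]
        by_cases h2x : 2 * x ≤ y
        · -- y odd (since 2x ≤ y and the halving test failed); B decrements too
          have hodd : y % 2 ≠ 0 := by omega
          rw [jumpLoopB]
          simp only [show (2 * x ≤ y ∧ y ≠ x) by exact ⟨h2x, heq⟩,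
            show ¬ x < 0 by omega, dite_false, hmd, hodd, ne_eq,
            not_false_eq_true, if_true]
          exact ih x (y - 1) (cnt + 1) hx (by omega) (by omega)
        · -- x < y < 2x: A decrements through the interval; B has already exited
          rw [loopB_exit x y cnt (by omega)]
          rw [ih x (y - 1) (cnt + 1) hx (by omega) (by omega),
            loopB_exit x (y - 1) (cnt + 1) (by omega)]
          ring

-- ===== VERDICT (by name: the statement is the Claim_ definition above) =====
theorem jump_to_spec : Claim_equal_jump_to := by
  intro x y _ hpre
  unfold Spec_jump_to jump_to jump_to_alt
  exact loop_eq ((y - x).toNat + 70) x y 0 hpre.1 hpre.2 (by omega)
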